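-- pv_equiv track=rewrite | github.com/mayflower/agentsh | src/agentsh/commands/structured.py | _find_hunk_match
-- ===== SOURCE A (Python) =====
-- def _find_hunk_match(
--     file_lines: list[str],
--     expected_lines: list[str],
--     target: int,
--     fuzz: int,
-- ) -> int | None:
--     """Find where expected_lines match in file_lines, starting near target."""
--     if not expected_lines:
--         # Empty hunk -- insert at target position
--         return min(target, len(file_lines))
--
--     # Try exact position first
--     if _lines_match(file_lines, expected_lines, target):
--         return target
--
--     # Try with fuzz
--     for offset in range(1, fuzz + 1):
--         for delta in (offset, -offset):
--             pos = target + delta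
--             if 0 <= pos <= len(file_lines) - len(expected_lines) and _lines_match(
--                 file_lines, expected_lines, pos
--             ):
--                 return pos
--
--     # Try wider search
--     for pos in range(max(0, target - 20), min(len(file_lines), target + 20)):
--         if _lines_match(file_lines, expected_lines, pos):
--             return pos
--
--     return None
--
-- def _lines_match(file_lines: list[str], expected: list[str], start: int) -> bool:
--     """Check if expected lines match file_lines starting at start."""
--     if start < 0 or start + len(expected) > len(file_lines):
--         return False
--     for i, exp in enumerate(expected):
--         actual = file_lines[start + i]
--         # Compare stripped of trailing newline for flexibility
--         if actual.rstrip("\n\r") != exp.rstrip("\n\r"):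
--             return False
--     return True
-- ===== SOURCE B (Python) =====
-- def _find_hunk_match(file_lines, expected_lines, target, fuzz):
--     """Find where expected_lines match in file_lines, starting near target."""
--     if not expected_lines:
--         return min(target, len(file_lines))
--     n, m = len(file_lines), len(expected_lines)
--     pat = [e.rstrip("\n\r") for e in expected_lines]
--     text = [l.rstrip("\n\r") for l in file_lines]
--     matches = [p for p in range(n - m + 1) if text[p:p + m] == pat]
--     if target in matches:
--         return target
--     near = [p for p in matches if abs(p - target) <= fuzz]
--     if near:
--         return min(near, key=lambda p: (abs(p - target), p < target))
--     lo, hi = max(0, target - 20), min(n, target + 20)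
--     window = [p for p in matches if lo <= p < hi]
--     return window[0] if window else None
-- ===== Notes on version B (the rewrite author's own statement) =====
-- stated objective: alternative
-- what changed: Instead of A's three staged probing loops over candidate positions, B computes every match position of the hunk in one scan of the file and then picks the answer by selection: the target itself if it matches, else the match minimizing the key (|p-target|, p<target) among matches within fuzz, else the first match inside the +/-20 window.
import Mathlib
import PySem

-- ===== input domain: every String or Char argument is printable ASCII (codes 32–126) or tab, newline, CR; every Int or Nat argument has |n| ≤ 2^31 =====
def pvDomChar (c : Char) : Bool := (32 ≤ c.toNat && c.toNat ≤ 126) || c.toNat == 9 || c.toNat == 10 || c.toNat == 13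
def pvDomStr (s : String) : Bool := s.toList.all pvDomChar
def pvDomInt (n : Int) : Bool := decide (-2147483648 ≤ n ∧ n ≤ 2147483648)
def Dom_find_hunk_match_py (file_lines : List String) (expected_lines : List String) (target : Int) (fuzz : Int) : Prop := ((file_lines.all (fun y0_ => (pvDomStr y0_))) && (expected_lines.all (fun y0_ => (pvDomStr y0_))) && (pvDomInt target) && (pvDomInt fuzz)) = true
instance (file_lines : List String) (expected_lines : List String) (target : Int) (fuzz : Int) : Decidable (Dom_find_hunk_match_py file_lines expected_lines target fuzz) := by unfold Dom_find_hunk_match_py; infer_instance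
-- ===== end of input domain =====

-- B replaces A's three staged probing loops by computing the full set of match
-- positions in one scan and then SELECTING the answer arithmetically
-- (min-by-(distance, side) within fuzz, else first in the window); objective: alternative.

-- shared helper: s.rstrip("\n\r") as a character list (identical code in both Pythons)
def rstripNL (s : String) : List Char :=
  (s.toList.reverse.dropWhile (fun c => c == '\n' || c == '\r')).reverse

-- ===== PORT A =====
-- _lines_match: the guard then the indexed element loop.  file_lines[start+i] is
-- ported with pyGet?; the `none` branch returns false, which is unreachable since
-- the guard ensures the index is in range (exact).
def linesMatchA (file_lines : List String) (expected : List String) (start : Int) : Bool :=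
  if start < 0 || start + (expected.length : Int) > (file_lines.length : Int) then false
  else (PySem.List.enumerate expected).all (fun ie =>
    match PySem.List.pyGet? file_lines (start + ie.1) with
    | some actual => rstripNL actual == rstripNL ie.2
    | none => false)

-- inner `for delta in (offset, -offset)` loop with early return
def tryDeltasA (file_lines : List String) (expected : List String) (target : Int) : List Int → Option Int
  | [] => none
  | d :: rest =>
    let pos := target + d
    if (decide (0 ≤ pos) && decide (pos ≤ (file_lines.length : Int) - (expected.length : Int)))
        && linesMatchA file_lines expected pos then some pos
    else tryDeltasA file_lines expected target rest

-- outer `for offset in range(1, fuzz+1)` loop with early return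
def fuzzLoopA (file_lines : List String) (expected : List String) (target : Int) : List Int → Option Int
  | [] => none
  | o :: rest =>
    match tryDeltasA file_lines expected target [o, -o] with
    | some p => some p
    | none => fuzzLoopA file_lines expected target rest

def find_hunk_match_py (file_lines : List String) (expected_lines : List String) (target : Int) (fuzz : Int) : Option Int :=
  if expected_lines.isEmpty then some (min target (file_lines.length : Int))
  else if linesMatchA file_lines expected_lines target then some target
  else
    match fuzzLoopA file_lines expected_lines target (PySem.List.pyRange 1 (fuzz + 1) 1) with
    | some p => some p
    | none =>
      -- wider search: first matching pos in the window, else None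
      (PySem.List.pyRange (max 0 (target - 20)) (min (file_lines.length : Int) (target + 20)) 1).find?
        (fun pos => linesMatchA file_lines expected_lines pos)

-- ===== PORT B =====
-- `matches = [p for p in range(n - m + 1) if text[p:p+m] == pat]`: every match
-- position, found in one scan comparing a slice of the pre-stripped lines
def matchesB (file_lines : List String) (expected : List String) : List Int :=
  (PySem.List.pyRange 0 ((file_lines.length : Int) - (expected.length : Int) + 1) 1).filter
    (fun p => PySem.List.slice (file_lines.map rstripNL) (some p) (some (p + (expected.length : Int)))
      == expected.map rstripNL)

def find_hunk_match_py_alt (file_lines : List String) (expected_lines : List String) (target : Int) (fuzz : Int) : Option Int :=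
  if expected_lines.isEmpty then some (min target (file_lines.length : Int))
  else
    let ms := matchesB file_lines expected_lines
    if ms.contains target then some target
    else
      let near := ms.filter (fun p => decide ((((p - target).natAbs : Int)) ≤ fuzz))
      if near.isEmpty then
        -- window = [p for p in matches if lo <= p < hi]; window[0] if window else None
        (ms.filter (fun p =>
          decide (max 0 (target - 20) ≤ p) && decide (p < min (file_lines.length : Int) (target + 20)))).head?
      else
        -- min(near, key=lambda p: (abs(p - target), p < target))
        PySem.List.min2? near (fun p => (((p - target).natAbs : Int)))
          (fun p => decide (p < target))

-- ===== PRECONDITION & SPEC =====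
def Spec_find_hunk_match_py (file_lines : List String) (expected_lines : List String) (target : Int) (fuzz : Int) (out : Option Int) : Prop := out = find_hunk_match_py_alt file_lines expected_lines target fuzz
instance (file_lines : List String) (expected_lines : List String) (target : Int) (fuzz : Int) (out : Option Int) : Decidable (Spec_find_hunk_match_py file_lines expected_lines target fuzz out) := by unfold Spec_find_hunk_match_py; infer_instance

-- ===== CLAIM (what is proved, stated in full; the proofs are below) =====
def Claim_equal_find_hunk_match_py : Prop := ∀ (file_lines : List String) (expected_lines : List String) (target : Int) (fuzz : Int), Dom_find_hunk_match_py file_lines expected_lines target fuzz → Spec_find_hunk_match_py file_lines expected_lines target fuzz (find_hunk_match_py file_lines expected_lines target fuzz)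

-- ===== LEMMAS AND PROOFS =====

-- A's element-by-element loop equals a take/drop comparison, generalized over the enumerate start
theorem enum_all_eq_slice (fl : List String) (ex : List String) (s k : Int)
    (h0 : 0 ≤ s + k) (h : s + k + ex.length ≤ fl.length) :
    ((PySem.List.enumerate ex k).all (fun ie =>
      match PySem.List.pyGet? fl (s + ie.1) with
      | some actual => rstripNL actual == rstripNL ie.2
      | none => false))
    = (((fl.drop (s + k).toNat).take ex.length).map rstripNL == ex.map rstripNL) := by
  induction ex generalizing k with
  | nil => simp [PySem.List.enumerate_nil]
  | cons x xs ih =>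
    have hlt : (s + k).toNat < fl.length := by
      simp only [List.length_cons] at h; omega
    rw [PySem.List.enumerate_cons, List.all_cons]
    have hget : PySem.List.pyGet? fl (s + k) = some fl[(s + k).toNat] := by
      rw [PySem.List.pyGet?_of_nonneg_of_lt fl h0 (by omega)]
      exact List.getElem?_eq_getElem hlt
    rw [List.drop_eq_getElem_cons hlt]
    simp only [List.length_cons, List.take_succ_cons, List.map_cons, List.cons_beq_cons, hget]
    have hk : (s + (k + 1)).toNat = (s + k).toNat + 1 := by omega
    rw [← hk, ih (k + 1) (by omega) (by simp only [List.length_cons] at h; omega)]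

-- _lines_match as the slice-of-stripped-lines comparison used by B
theorem linesMatchA_eq (fl ex : List String) (p : Int) :
    linesMatchA fl ex p
      = (decide (0 ≤ p) && decide (p + (ex.length : Int) ≤ (fl.length : Int))
          && (PySem.List.slice (fl.map rstripNL) (some p) (some (p + (ex.length : Int)))
              == ex.map rstripNL)) := by
  unfold linesMatchA
  by_cases h1 : p < 0
  · simp [h1, show ¬ (0 ≤ p) by omega]
  · by_cases h2 : p + (ex.length : Int) > (fl.length : Int)
    · simp [h1, h2, show ¬ (p + (ex.length : Int) ≤ (fl.length : Int)) by omega]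
    · simp only [h1, h2, decide_false, Bool.or_self,
        show (0 ≤ p) from by omega, show (p + (ex.length : Int) ≤ (fl.length : Int)) from by omega,
        decide_true, Bool.true_and]
      rw [PySem.List.slice_toNat _ (by omega) (by omega)]
      have hm : ((p + (ex.length : Int)).toNat - p.toNat) = ex.length := by omega
      rw [hm, ← List.map_drop, ← List.map_take]
      have := enum_all_eq_slice fl ex p 0 (by omega) (by omega)
      simpa using this

theorem lm_bounds (fl ex : List String) (p : Int) (h : linesMatchA fl ex p = true) :
    0 ≤ p ∧ p + (ex.length : Int) ≤ (fl.length : Int) := by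
  rw [linesMatchA_eq] at h
  simp only [Bool.and_eq_true, decide_eq_true_eq] at h
  exact ⟨h.1.1, h.1.2⟩

theorem mem_matchesB (fl ex : List String) (p : Int) :
    p ∈ matchesB fl ex ↔ linesMatchA fl ex p = true := by
  unfold matchesB
  rw [List.mem_filter, PySem.List.mem_pyRange_one, linesMatchA_eq]
  constructor
  · rintro ⟨⟨h0, h1⟩, h2⟩
    simp [h0, show p + (ex.length : Int) ≤ (fl.length : Int) by omega, h2]
  · intro h
    simp only [Bool.and_eq_true, decide_eq_true_eq] at h
    exact ⟨⟨h.1.1, by omega⟩, h.2⟩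

-- A's redundant bounds test is absorbed by _lines_match's own guard
theorem bound_absorb (fl ex : List String) (pos : Int) :
    ((decide (0 ≤ pos) && decide (pos ≤ (fl.length : Int) - (ex.length : Int)))
      && linesMatchA fl ex pos) = linesMatchA fl ex pos := by
  by_cases h : linesMatchA fl ex pos = true
  · have := lm_bounds fl ex pos h
    simp [h, this.1, show pos ≤ (fl.length : Int) - (ex.length : Int) by omega]
  · simp [Bool.eq_false_iff.mpr h]

-- the fuzz loop is find? over the flattened delta candidates
theorem fuzzLoopA_eq_find (fl ex : List String) (t : Int) (offs : List Int) :
    fuzzLoopA fl ex t offs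
      = (offs.flatMap (fun o => [t + o, t - o])).find? (fun p => linesMatchA fl ex p) := by
  induction offs with
  | nil => simp [fuzzLoopA]
  | cons o rest ih =>
    rw [List.flatMap_cons, List.find?_append, ← ih]
    show (match tryDeltasA fl ex t [o, -o] with
          | some p => some p
          | none => fuzzLoopA fl ex t rest)
        = (List.find? (fun p => linesMatchA fl ex p) [t + o, t - o]).or (fuzzLoopA fl ex t rest)
    have hd : tryDeltasA fl ex t [o, -o]
        = List.find? (fun p => linesMatchA fl ex p) [t + o, t - o] := by
      simp only [tryDeltasA, bound_absorb, List.find?]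
      rw [show t - o = t + -o from Int.sub_eq_add_neg ..]
      cases linesMatchA fl ex (t + o) <;> cases linesMatchA fl ex (t + -o) <;> simp
    rw [hd]
    cases List.find? (fun p => linesMatchA fl ex p) [t + o, t - o] <;> simp

-- the combined (distance, side) key as one integer: 2*|p-t| + (1 if p<t else 0)
def Kf (t p : Int) : Int := 2 * ((p - t).natAbs : Int) + (if p < t then 1 else 0)

theorem Kf_plus (t o : Int) (h : 1 ≤ o) : Kf t (t + o) = 2 * o := by
  unfold Kf; split_ifs <;> omega

theorem Kf_minus (t o : Int) (h : 1 ≤ o) : Kf t (t - o) = 2 * o + 1 := by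
  unfold Kf; split_ifs <;> omega

-- the delta candidate list, strictly increasing in the key Kf
theorem pairwiseK_flatMap (t : Int) (offs : List Int) (hp : offs.Pairwise (· < ·))
    (h1 : ∀ o ∈ offs, 1 ≤ o) :
    (offs.flatMap (fun o => [t + o, t - o])).Pairwise (fun a b => Kf t a < Kf t b) := by
  induction offs with
  | nil => simp
  | cons o rest ih =>
    rw [List.flatMap_cons]
    have ho : 1 ≤ o := h1 o (List.mem_cons_self ..)
    have hrest : ∀ x ∈ rest.flatMap (fun o => [t + o, t - o]), 2 * o + 1 < Kf t x := by
      intro x hx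
      rw [List.mem_flatMap] at hx
      obtain ⟨o', ho', hx⟩ := hx
      have h1' : 1 ≤ o' := h1 o' (List.mem_cons_of_mem _ ho')
      have hlt : o < o' := (List.pairwise_cons.mp hp).1 o' ho'
      simp only [List.mem_cons] at hx
      rcases hx with rfl | rfl | h
      · rw [Kf_plus t o' h1']; omega
      · rw [Kf_minus t o' h1']; omega
      · exact absurd h (List.not_mem_nil)
    refine List.pairwise_append.mpr ⟨?_, ?_, ?_⟩
    · simp [Kf_plus t o ho, Kf_minus t o ho]
    · exact ih (List.pairwise_cons.mp hp).2 (fun o' h' => h1 o' (List.mem_cons_of_mem _ h'))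
    · intro a ha b hb
      simp only [List.mem_cons, List.mem_singleton] at ha
      rcases ha with rfl | rfl | h
      · have := hrest b hb; rw [Kf_plus t o ho]; omega
      · have := hrest b hb; rw [Kf_minus t o ho]; omega
      · exact absurd h (List.not_mem_nil)

theorem mem_deltas (t f p : Int) :
    p ∈ (PySem.List.pyRange 1 (f + 1) 1).flatMap (fun o => [t + o, t - o])
      ↔ 1 ≤ ((p - t).natAbs : Int) ∧ ((p - t).natAbs : Int) ≤ f := by
  rw [List.mem_flatMap]
  constructor
  · rintro ⟨o, ho, hx⟩
    rw [PySem.List.mem_pyRange_one] at ho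
    simp only [List.mem_cons] at hx
    rcases hx with rfl | rfl | h
    · constructor <;> omega
    · constructor <;> omega
    · exact absurd h (List.not_mem_nil)
  · rintro ⟨h1, h2⟩
    refine ⟨((p - t).natAbs : Int), ?_, ?_⟩
    · rw [PySem.List.mem_pyRange_one]; omega
    · simp only [List.mem_cons]
      omega

-- head of a Pairwise-R list is R-below every other member
theorem head_pairwise_min {R : Int → Int → Prop} (l : List Int) (q : Int)
    (hp : l.Pairwise R) (hh : l.head? = some q) : ∀ e ∈ l, e = q ∨ R q e := by
  cases l with
  | nil => simp at hh
  | cons a rest =>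
    simp only [List.head?_cons, Option.some.injEq] at hh
    subst hh
    intro e he
    rcases List.mem_cons.mp he with rfl | hm
    · exact Or.inl rfl
    · exact Or.inr ((List.pairwise_cons.mp hp).1 e hm)

-- min2?'s comparison with keys (|p-t|, p<t) is the comparison of Kf
theorem min2_step_eq (t x m : Int) :
    (decide ((((x - t).natAbs : Int)) < (((m - t).natAbs : Int)))
      || (!decide ((((m - t).natAbs : Int)) < (((x - t).natAbs : Int)))
          && decide ((decide (x < t)) < (decide (m < t)))))
    = decide (Kf t x < Kf t m) := by
  rw [Bool.eq_iff_iff]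
  by_cases hx : x < t <;> by_cases hm : m < t <;>
    simp only [hx, hm, decide_true, decide_false, Bool.or_eq_true, Bool.and_eq_true,
      Bool.not_eq_true', decide_eq_true_eq, decide_eq_false_iff_not, Kf, Bool.lt_iff,
      and_false, false_and, and_true, true_and, and_self, or_false, if_pos, if_neg,
      not_false_iff, Bool.true_eq_false, Bool.false_eq_true, iff_false, iff_true, not_lt] <;>
    omega

-- the min2? fold returns a member whose key Kf is minimal
theorem min2_foldl_min (t : Int) (l : List Int) (a : Int) :
    ∃ r, List.foldl (fun acc x =>
        match acc with
        | none => some x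
        | some m => if decide (Kf t x < Kf t m) then some x else some m)
        (some a) l = some r
      ∧ (r = a ∨ r ∈ l) ∧ Kf t r ≤ Kf t a ∧ ∀ e ∈ l, Kf t r ≤ Kf t e := by
  induction l generalizing a with
  | nil => exact ⟨a, rfl, Or.inl rfl, le_refl _, by simp⟩
  | cons x rest ih =>
    by_cases h : Kf t x < Kf t a
    · obtain ⟨r, hr, hmem, hle, hall⟩ := ih x
      refine ⟨r, by simpa [h] using hr, ?_, by omega, ?_⟩
      · rcases hmem with rfl | hm
        · exact Or.inr (List.mem_cons_self ..)
        · exact Or.inr (List.mem_cons_of_mem _ hm)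
      · intro e he
        rcases List.mem_cons.mp he with rfl | hm
        · exact hle
        · exact hall e hm
    · obtain ⟨r, hr, hmem, hle, hall⟩ := ih a
      refine ⟨r, by simpa [h] using hr, ?_, hle, ?_⟩
      · rcases hmem with rfl | hm
        · exact Or.inl rfl
        · exact Or.inr (List.mem_cons_of_mem _ hm)
      · intro e he
        rcases List.mem_cons.mp he with rfl | hm
        · omega
        · exact hall e hm

-- min2? on a nonempty list: a member with Kf-minimal key
theorem min2_spec (t : Int) (a : Int) (rest : List Int) :
    ∃ r, PySem.List.min2? (a :: rest) (fun p => (((p - t).natAbs : Int)))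
          (fun p => decide (p < t)) = some r
      ∧ r ∈ a :: rest ∧ ∀ e ∈ a :: rest, Kf t r ≤ Kf t e := by
  obtain ⟨r, hr, hmem, hle, hall⟩ := min2_foldl_min t rest a
  refine ⟨r, ?_, ?_, ?_⟩
  · unfold PySem.List.min2?
    rw [List.foldl_cons]
    exact (List.foldl_ext _ _ _ (fun acc x _ => by
      cases acc with
      | none => rfl
      | some m => simp only [min2_step_eq])).trans hr
  · rcases hmem with rfl | hm
    · exact List.mem_cons_self ..
    · exact List.mem_cons_of_mem _ hm
  · intro e he
    rcases List.mem_cons.mp he with rfl | hm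
    · exact hle
    · exact hall e hm

-- two strictly increasing integer lists with the same members are equal
theorem eq_of_pairwise_lt_of_mem_iff :
    ∀ (l1 l2 : List Int), l1.Pairwise (· < ·) → l2.Pairwise (· < ·) →
      (∀ x, x ∈ l1 ↔ x ∈ l2) → l1 = l2
  | [], [], _, _, _ => rfl
  | [], b :: l2, _, _, hm => absurd ((hm b).mpr (List.mem_cons_self ..)) (List.not_mem_nil)
  | a :: l1, [], _, _, hm => absurd ((hm a).mp (List.mem_cons_self ..)) (List.not_mem_nil)
  | a :: l1, b :: l2, h1, h2, hm => by
    have hab : a = b := by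
      have ha : a ∈ b :: l2 := (hm a).mp (List.mem_cons_self ..)
      have hb : b ∈ a :: l1 := (hm b).mpr (List.mem_cons_self ..)
      rcases List.mem_cons.mp ha with h | h
      · exact h
      · have h1' := (List.pairwise_cons.mp h2).1 a h
        rcases List.mem_cons.mp hb with h' | h'
        · omega
        · have := (List.pairwise_cons.mp h1).1 b h'; omega
    subst hab
    have htail : ∀ x, x ∈ l1 ↔ x ∈ l2 := by
      intro x
      constructor
      · intro hx
        have hax : a < x := (List.pairwise_cons.mp h1).1 x hx
        rcases List.mem_cons.mp ((hm x).mp (List.mem_cons_of_mem _ hx)) with rfl | h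
        · omega
        · exact h
      · intro hx
        have hax : a < x := (List.pairwise_cons.mp h2).1 x hx
        rcases List.mem_cons.mp ((hm x).mpr (List.mem_cons_of_mem _ hx)) with rfl | h
        · omega
        · exact h
    rw [eq_of_pairwise_lt_of_mem_iff l1 l2 (List.pairwise_cons.mp h1).2
      (List.pairwise_cons.mp h2).2 htail]

-- matchesB is strictly increasing
theorem matchesB_pairwise (fl ex : List String) : (matchesB fl ex).Pairwise (· < ·) :=
  List.Pairwise.filter _ (PySem.List.pairwise_lt_pyRange_one 0 _)

-- ===== VERDICT (by name: the statement is the Claim_ definition above) =====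
theorem find_hunk_match_py_spec : Claim_equal_find_hunk_match_py := by
  intro fl el t f _hdom
  unfold Spec_find_hunk_match_py find_hunk_match_py find_hunk_match_py_alt
  by_cases he : el.isEmpty
  · simp [he]
  · simp only [he, Bool.false_eq_true, if_false]
    have hcont : (matchesB fl el).contains t = linesMatchA fl el t := by
      have h1 : (matchesB fl el).contains t = decide (t ∈ matchesB fl el) := by simp
      rw [h1]
      cases h : linesMatchA fl el t
      · simp [mem_matchesB, h]
      · simp [mem_matchesB, h]
    rw [hcont]
    by_cases hlmt : linesMatchA fl el t = true
    · simp [hlmt]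
    · have hlmt' : linesMatchA fl el t = false := Bool.eq_false_iff.mpr hlmt
      simp only [hlmt', Bool.false_eq_true, if_false]
      rw [fuzzLoopA_eq_find]
      set D := (PySem.List.pyRange 1 (f + 1) 1).flatMap (fun o => [t + o, t - o]) with hD
      set near := (matchesB fl el).filter
        (fun p => decide ((((p - t).natAbs : Int)) ≤ f)) with hnear
      have hmem_near : ∀ p, p ∈ near ↔ linesMatchA fl el p = true ∧ ((p - t).natAbs : Int) ≤ f := by
        intro p
        rw [hnear, List.mem_filter, mem_matchesB]
        simp
      have hmem_FA : ∀ p, p ∈ D.filter (fun p => linesMatchA fl el p) ↔ p ∈ near := by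
        intro p
        rw [List.mem_filter, hD, mem_deltas, hmem_near]
        constructor
        · rintro ⟨⟨h1, h2⟩, h3⟩; exact ⟨h3, h2⟩
        · rintro ⟨h1, h2⟩
          refine ⟨⟨?_, h2⟩, h1⟩
          by_contra h
          have : p = t := by omega
          exact hlmt (this ▸ h1)
      rw [← List.head?_filter]
      have hpairD : (D.filter (fun p => linesMatchA fl el p)).Pairwise
          (fun a b => Kf t a < Kf t b) := by
        refine List.Pairwise.filter _ ?_
        exact pairwiseK_flatMap t _ (PySem.List.pairwise_lt_pyRange_one 1 (f + 1))
          (fun o ho => by rw [PySem.List.mem_pyRange_one] at ho; omega)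
      cases hnl : near with
      | nil =>
        have hFA : D.filter (fun p => linesMatchA fl el p) = [] := by
          rw [List.eq_nil_iff_forall_not_mem]
          intro p hp
          have := (hmem_FA p).mp hp
          rw [hnl] at this
          exact List.not_mem_nil this
        rw [hFA]
        simp only [List.head?_nil, List.isEmpty_nil, if_true]
        -- window phase: find? over the range = head? of B's filtered matches
        rw [← List.head?_filter]
        congr 1
        refine eq_of_pairwise_lt_of_mem_iff _ _
          (List.Pairwise.filter _ (PySem.List.pairwise_lt_pyRange_one _ _))
          (List.Pairwise.filter _ (matchesB_pairwise fl el)) ?_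
        intro p
        rw [List.mem_filter, List.mem_filter, PySem.List.mem_pyRange_one, mem_matchesB]
        constructor
        · rintro ⟨⟨h1, h2⟩, h3⟩
          refine ⟨h3, ?_⟩
          simp only [Bool.and_eq_true, decide_eq_true_eq]
          exact ⟨h1, h2⟩
        · rintro ⟨h1, h2⟩
          simp only [Bool.and_eq_true, decide_eq_true_eq] at h2
          exact ⟨⟨h2.1, h2.2⟩, h1⟩
      | cons a rest =>
        simp only [List.isEmpty_cons, Bool.false_eq_true, if_false]
        obtain ⟨r, hr, hrmem, hrall⟩ := min2_spec t a rest
        rw [hr]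
        -- A's find? hits exactly r
        have hrFA : r ∈ D.filter (fun p => linesMatchA fl el p) := by
          rw [hmem_FA, hnl]; exact hrmem
        cases hh : (D.filter (fun p => linesMatchA fl el p)).head? with
        | none =>
          rw [List.head?_eq_none_iff] at hh
          rw [hh] at hrFA
          exact absurd hrFA (List.not_mem_nil)
        | some q =>
          have hqmem : q ∈ D.filter (fun p => linesMatchA fl el p) :=
            List.mem_of_mem_head? hh
          have hqr : q = r := by
            have h1 := head_pairwise_min _ q hpairD hh r hrFA
            have h2 : Kf t r ≤ Kf t q := by
              have : q ∈ near := (hmem_FA q).mp hqmem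
              rw [hnl] at this
              exact hrall q this
            rcases h1 with h | h
            · exact h.symm
            · omega
          rw [hqr]
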